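-- pv_equiv track=rewrite | github.com/mikenac/hl7_sender | app.py | split_hl7_messages
-- ===== SOURCE A (Python) =====
-- def split_hl7_messages(raw_input: str):
--     """
--     Split pasted HL7 text into individual messages using lines that start with MSH as boundaries.
--     Falls back to one message if no MSH is found.
--     """
--     lines = [line.strip() for line in raw_input.splitlines() if line.strip()]
--     messages = []
--     current = []
--
--     for line in lines:
--         if line.startswith("MSH"):
--             if current:
--                 messages.append("\r".join(current))
--                 current = []
--         current.append(line)
--
--     if current:
--         messages.append("\r".join(current))
--
--     if not messages and raw_input.strip():
--         messages.append(raw_input.strip())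
--
--     return messages
-- ===== SOURCE B (Python) =====
-- def split_hl7_messages(raw_input: str):
--     """
--     Split pasted HL7 text into individual messages on lines starting with MSH.
--     Alternative decomposition: scan the stripped lines from the END, closing a
--     message each time an MSH line is reached, building the output back-to-front.
--     """
--     lines = [line.strip() for line in raw_input.splitlines() if line.strip()]
--     messages = []        # collected back-to-front
--     pending = []         # lines of the current message, collected back-to-front
--     for line in reversed(lines):
--         pending.append(line)
--         if line.startswith("MSH"):
--             messages.append("\r".join(reversed(pending)))
--             pending = []
--     if pending:
--         messages.append("\r".join(reversed(pending)))
--     messages.reverse()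
--     if not messages and raw_input.strip():
--         messages.append(raw_input.strip())
--     return messages
-- ===== Notes on version B (the rewrite author's own statement) =====
-- stated objective: alternative
-- what changed: B scans the stripped lines from the end, closing a message at each MSH line and building the message list back-to-front, instead of A's forward accumulator that flushes the current group when the next MSH appears.
import Mathlib
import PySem

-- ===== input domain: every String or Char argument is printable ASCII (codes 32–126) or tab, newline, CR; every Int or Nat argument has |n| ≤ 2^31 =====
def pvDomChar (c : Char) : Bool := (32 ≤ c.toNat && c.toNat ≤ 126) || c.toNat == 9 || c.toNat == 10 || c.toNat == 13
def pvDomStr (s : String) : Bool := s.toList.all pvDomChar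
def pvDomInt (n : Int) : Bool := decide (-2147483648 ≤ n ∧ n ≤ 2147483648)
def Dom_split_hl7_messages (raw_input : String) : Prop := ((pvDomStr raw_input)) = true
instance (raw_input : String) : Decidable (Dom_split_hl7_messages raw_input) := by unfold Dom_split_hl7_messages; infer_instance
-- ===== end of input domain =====

-- B rebuilds the messages back-to-front by scanning the stripped lines from the END,
-- closing a message at each MSH line; same return value, alternative traversal order.

-- ===== PORT A =====
-- A's forward loop over the lines, state (messages, current); after the loop the
-- leftover 'current' is flushed.
def pvALoop (msgs current : List String) : List String → List String
  | [] => if current ≠ [] then msgs ++ [PySem.Str.join "\r" current] else msgs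
  | l :: ls =>
    if PySem.Str.startswith l "MSH" then
      if current ≠ [] then pvALoop (msgs ++ [PySem.Str.join "\r" current]) ([] ++ [l]) ls
      else pvALoop msgs (current ++ [l]) ls
    else pvALoop msgs (current ++ [l]) ls

def split_hl7_messages (raw_input : String) : List String :=
  let lines := ((PySem.Str.splitlines raw_input).map PySem.Str.strip).filter (fun l => l != "")
  let messages := pvALoop [] [] lines
  if messages = [] ∧ PySem.Str.strip raw_input ≠ "" then
    messages ++ [PySem.Str.strip raw_input]
  else messages

-- ===== PORT B =====
-- B's backward loop: state (messages-reversed, pending-lines-reversed).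
def pvBLoop (msgs pending : List String) : List String → List String × List String
  | [] => (msgs, pending)
  | l :: ls =>
    let p := pending ++ [l]
    if PySem.Str.startswith l "MSH" then
      pvBLoop (msgs ++ [PySem.Str.join "\r" p.reverse]) [] ls
    else pvBLoop msgs p ls

def split_hl7_messages_alt (raw_input : String) : List String :=
  let lines := ((PySem.Str.splitlines raw_input).map PySem.Str.strip).filter (fun l => l != "")
  let st := pvBLoop [] [] lines.reverse
  let messages :=
    (if st.2 ≠ [] then st.1 ++ [PySem.Str.join "\r" st.2.reverse] else st.1).reverse
  if messages = [] ∧ PySem.Str.strip raw_input ≠ "" then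
    messages ++ [PySem.Str.strip raw_input]
  else messages

-- ===== PRECONDITION & SPEC =====
def Spec_split_hl7_messages (raw_input : String) (out : List String) : Prop := out = split_hl7_messages_alt raw_input
instance (raw_input : String) (out : List String) : Decidable (Spec_split_hl7_messages raw_input out) := by unfold Spec_split_hl7_messages; infer_instance

-- ===== CLAIM (what is proved, stated in full; the proofs are below) =====
def Claim_equal_split_hl7_messages : Prop := ∀ (raw_input : String), Dom_split_hl7_messages raw_input → Spec_split_hl7_messages raw_input (split_hl7_messages raw_input)

-- ===== LEMMAS AND PROOFS =====

-- the abstract grouping both loops compute (forward form)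
def pvG (current : List String) : List String → List (List String)
  | [] => if current = [] then [] else [current]
  | l :: ls =>
    if PySem.Str.startswith l "MSH" then
      if current = [] then pvG [l] ls else current :: pvG [l] ls
    else pvG (current ++ [l]) ls

-- the abstract grouping B computes (groups stored right-to-left, each group reversed)
def pvK : List String → List String → List (List String)
  | [], pending => if pending = [] then [] else [pending.reverse]
  | l :: rs, pending =>
    if PySem.Str.startswith l "MSH" then (pending ++ [l]).reverse :: pvK rs []
    else pvK rs (pending ++ [l])

theorem pvALoop_eq (ls : List String) : ∀ msgs current,
    pvALoop msgs current ls = msgs ++ (pvG current ls).map (PySem.Str.join "\r") := by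
  induction ls with
  | nil => intro msgs current; simp only [pvALoop, pvG]; split_ifs <;> simp_all
  | cons l ls ih =>
    intro msgs current
    simp only [pvALoop, pvG]
    split_ifs with h1 h2 h3 <;> simp_all

theorem pvBLoop_eq (rs : List String) : ∀ msgs pending,
    (let st := pvBLoop msgs pending rs;
     if st.2 ≠ [] then st.1 ++ [PySem.Str.join "\r" st.2.reverse] else st.1)
    = msgs ++ (pvK rs pending).map (PySem.Str.join "\r") := by
  induction rs with
  | nil => intro msgs pending; simp only [pvBLoop, pvK]; split_ifs <;> simp_all
  | cons l rs ih =>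
    intro msgs pending
    by_cases h1 : PySem.Str.startswith l "MSH"
    · simp only [pvBLoop, pvK, h1, if_true]
      rw [ih]
      simp
    · rw [Bool.not_eq_true] at h1
      simp only [pvBLoop, pvK, h1, Bool.false_eq_true, if_false]
      rw [ih _ _]

theorem pvG_noMSH (xs : List String) : ∀ current,
    (∀ l ∈ xs, ¬ PySem.Str.startswith l "MSH") →
    pvG current xs = if current ++ xs = [] then [] else [current ++ xs] := by
  induction xs with
  | nil => intro current _; simp [pvG]
  | cons l xs ih =>
    intro current h
    have hl : ¬ PySem.Str.startswith l "MSH" := h l (by simp)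
    simp only [pvG, hl, Bool.false_eq_true, if_false]
    rw [ih (current ++ [l]) (fun y hy => h y (by simp [hy]))]
    simp

theorem pvG_split (xs : List String) : ∀ current l ys,
    PySem.Str.startswith l "MSH" →
    (∀ y ∈ ys, ¬ PySem.Str.startswith y "MSH") →
    pvG current (xs ++ l :: ys) = pvG current xs ++ [l :: ys] := by
  induction xs with
  | nil =>
    intro current l ys hl hys
    simp only [List.nil_append, pvG, hl, if_true]
    rw [pvG_noMSH ys [l] hys]
    split_ifs <;> simp_all
  | cons x xs ih =>
    intro current l ys hl hys
    simp only [List.cons_append, pvG]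
    split_ifs with h1 h2 <;> simp [ih _ l ys hl hys]

theorem pvK_eq (rs : List String) : ∀ pending,
    (∀ l ∈ pending, ¬ PySem.Str.startswith l "MSH") →
    pvK rs pending = (pvG [] (rs.reverse ++ pending.reverse)).reverse := by
  induction rs with
  | nil =>
    intro pending h
    have hrev : ∀ l ∈ pending.reverse, ¬ PySem.Str.startswith l "MSH" := by
      intro l hl; exact h l (List.mem_reverse.mp hl)
    simp only [pvK, List.reverse_nil, List.nil_append]
    rw [pvG_noMSH pending.reverse [] hrev]
    split_ifs <;> simp_all
  | cons l rs ih =>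
    intro pending h
    simp only [pvK, List.reverse_cons]
    split_ifs with h1
    · have hrev : ∀ y ∈ pending.reverse, ¬ PySem.Str.startswith y "MSH" := by
        intro y hy; exact h y (List.mem_reverse.mp hy)
      simp only [List.append_assoc, List.singleton_append]
      rw [pvG_split rs.reverse [] l pending.reverse h1 hrev, ih [] (by simp)]
      simp
    · have h' : ∀ y ∈ pending ++ [l], ¬ PySem.Str.startswith y "MSH" := by
        intro y hy
        rcases List.mem_append.mp hy with hy | hy
        · exact h y hy
        · simp at hy; subst hy; exact h1
      rw [ih (pending ++ [l]) h']
      simp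

-- ===== VERDICT (by name: the statement is the Claim_ definition above) =====
theorem split_hl7_messages_spec : Claim_equal_split_hl7_messages := by
  intro raw _
  unfold Spec_split_hl7_messages
  simp only [split_hl7_messages, split_hl7_messages_alt]
  rw [pvALoop_eq, pvBLoop_eq, pvK_eq _ [] (by simp)]
  simp
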